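-- pv_equiv track=rewrite | github.com/maria-pugacheva/LeetCode | src/python/_01_easy/_1370_increasing-decreasing-string.py | solution
-- ===== SOURCE A (Python) =====
-- def solution(s: str) -> str:
--     """Reorder s.
--
--     Examples:
--         >>> solution('rat')
--         'art'
--         >>> solution('aaaabbbbcccc')
--         'abccbaabccba'
--     """
--     chars = [0] * 26
--     for ch in s:
--         chars[ord(ch) - 97] += 1
--     res = []
--     cnt = len(s)
--     while cnt > 0:
--         for i in range(26):
--             if chars[i] > 0:
--                 res.append(chr(i + 97))
--                 chars[i] -= 1
--                 cnt -= 1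
--                 if cnt == 0:
--                     break
--         for j in range(25, -1, -1):
--             if chars[j] > 0:
--                 res.append(chr(j + 97))
--                 chars[j] -= 1
--                 cnt -= 1
--                 if cnt == 0:
--                     break
--     return ''.join(res)
-- ===== SOURCE B (Python) =====
-- def solution(s: str) -> str:
--     """Reorder s by expanding each letter's occurrences into sortable integer keys.
--
--     The k-th occurrence of letter i belongs to pass k; pass k lists letters
--     ascending when k is odd and descending when k is even, so the key
--     k*26 + (i if k is odd else 25-i) sorts every occurrence straight into place.
--     """
--     chars = [0] * 26
--     for ch in s:
--         chars[ord(ch) - 97] += 1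
--     keys = []
--     for i in range(26):
--         for k in range(1, chars[i] + 1):
--             keys.append(k * 26 + (i if k % 2 else 25 - i))
--     keys.sort()
--     return ''.join(
--         chr((key % 26 if (key // 26) % 2 else 25 - key % 26) + 97) for key in keys)
-- ===== Notes on version B (the rewrite author's own statement) =====
-- stated objective: alternative
-- what changed: B replaces A's destructive while-loop of alternating sweeps over the count array by a sort: it expands each letter's occurrences into integer keys k*26 + (i if k odd else 25-i) encoding (pass number, position within the pass), sorts the keys, and decodes them back to letters.
import Mathlib
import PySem

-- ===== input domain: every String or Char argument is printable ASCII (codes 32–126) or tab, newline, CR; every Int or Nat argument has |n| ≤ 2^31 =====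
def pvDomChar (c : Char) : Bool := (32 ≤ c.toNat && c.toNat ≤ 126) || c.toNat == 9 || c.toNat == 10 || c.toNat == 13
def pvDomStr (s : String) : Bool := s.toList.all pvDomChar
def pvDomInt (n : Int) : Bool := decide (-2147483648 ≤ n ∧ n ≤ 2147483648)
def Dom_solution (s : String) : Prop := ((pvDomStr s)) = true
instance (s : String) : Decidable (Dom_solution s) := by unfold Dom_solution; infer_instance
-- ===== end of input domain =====

-- B replaces A's destructive while-loop of alternating sweeps over the count array by a sort:
-- each occurrence of a letter becomes one integer key k*26 + (i if k odd else 25-i) encoding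
-- (pass number, position within the pass); sorting the keys and decoding them yields the answer.
-- Objective: alternative (a genuinely different, sort-based algorithm; a timing run measured it faster).

-- shared counting loop: both Pythons start with the identical 'chars[ord(ch) - 97] += 1' fold
def pvCount (l : List Char) : List Int :=
  l.foldl (fun c ch =>
    PySem.List.pySetD c ((ch.toNat : Int) - 97)
      (PySem.List.pyGetD c ((ch.toNat : Int) - 97) 0 + 1))
    (List.replicate 26 0)

def pvChr (i : Nat) : Char := Char.ofNat (i + 97)

-- ===== PORT A =====
-- inner 'for i in …: if chars[i] > 0: append/decrement, break when cnt hits 0'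
def pvFor (is : List Nat) (c : List Int) (r : List Char) (cnt : Int) :
    List Int × List Char × Int :=
  match is with
  | [] => (c, r, cnt)
  | i :: rest =>
    if 0 < c.getD i 0 then
      let c' := c.set i (c.getD i 0 - 1)
      let r' := r ++ [pvChr i]
      let cnt' := cnt - 1
      if cnt' = 0 then (c', r', cnt') else pvFor rest c' r' cnt'
    else pvFor rest c r cnt

-- 'while cnt > 0: ascending pass; descending pass' (fuel = len(s) bounds the iterations)
def pvWhile (fuel : Nat) (c : List Int) (r : List Char) (cnt : Int) : List Char :=
  match fuel with
  | 0 => r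
  | fuel + 1 =>
    if 0 < cnt then
      let t1 := pvFor (List.range 26) c r cnt
      let t2 := pvFor (List.range 26).reverse t1.1 t1.2.1 t1.2.2
      pvWhile fuel t2.1 t2.2.1 t2.2.2
    else r

def solution (s : String) : String :=
  String.mk (pvWhile s.toList.length (pvCount s.toList) [] (s.toList.length : Int))

-- ===== PORT B =====
-- key of the k-th occurrence of letter i: k*26 + (i if k % 2 else 25 - i)
def pvEnc (k i : Int) : Int :=
  k * 26 + (if PySem.Int.mod k 2 = 1 then i else 25 - i)

-- 'for i in range(26): for k in range(1, chars[i] + 1): keys.append(…)'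
def pvKeys (c : List Int) : List Int :=
  (PySem.List.pyRange 0 26 1).foldl (fun acc i =>
    (PySem.List.pyRange 1 (PySem.List.pyGetD c i 0 + 1) 1).foldl
      (fun acc2 k => acc2 ++ [pvEnc k i]) acc) []

-- 'chr((key % 26 if (key // 26) % 2 else 25 - key % 26) + 97)'
def pvDecode (key : Int) : Char :=
  Char.ofNat (((if PySem.Int.mod (PySem.Int.floordiv key 26) 2 = 1
      then PySem.Int.mod key 26 else 25 - PySem.Int.mod key 26) + 97).toNat)

def solution_alt (s : String) : String :=
  let c := pvCount s.toList
  String.mk ((PySem.List.sorted (pvKeys c) (fun x => x) false).map pvDecode)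

-- ===== PRECONDITION & SPEC =====
-- Pre_ excludes exactly the inputs on which the Python A raises IndexError: any character
-- whose code is outside [71, 122] makes 'chars[ord(ch) - 97]' an out-of-range index
-- (codes 71..96 wrap around as Python negative indices and A returns normally on them;
-- B counts with the same statement and raises identically outside Pre_).
def Pre_solution (s : String) : Prop :=
  (s.toList.all (fun ch => 71 ≤ ch.toNat && ch.toNat ≤ 122)) = true
instance (s : String) : Decidable (Pre_solution s) := by unfold Pre_solution; infer_instance
def pvWitness_solution : String := "rat"

def Spec_solution (s : String) (out : String) : Prop := out = solution_alt s
instance (s : String) (out : String) : Decidable (Spec_solution s out) := by unfold Spec_solution; infer_instance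

-- ===== CLAIM (what is proved, stated in full; the proofs are below) =====
def Claim_equal_solution : Prop := ∀ (s : String), Dom_solution s → Pre_solution s → Spec_solution s (solution s)

-- ===== LEMMAS AND PROOFS =====

-- one layer of the answer: the letters i (in the given order) whose count is at least k
def pvLayer (cs : List Int) (k : Int) (is : List Nat) : List Char :=
  is.filterMap (fun i => if k ≤ cs.getD i 0 then some (pvChr i) else none)

-- max(chars) (0 is never used: counts are a nonempty list)
def pvMax (cs : List Int) : Int :=
  match PySem.List.max? cs (fun x => x) with
  | some v => v
  | none => 0

-- decrement every positive count by one (effect of one of A's passes on the count array)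
def pvDec (cs : List Int) : List Int := cs.map (fun x => if 0 < x then x - 1 else x)

-- pointwise effect of pvFor over an arbitrary remaining index list
def pvDecOn (is : List Nat) (cs : List Int) : List Int :=
  cs.mapIdx (fun j x => if j ∈ is ∧ 0 < x then x - 1 else x)

-- the layer sequence A's while-loop emits, as a flatMap
def pvB (cs : List Int) : List Char :=
  (PySem.List.pyRange 1 (pvMax cs + 1) 1).flatMap
    (fun k => pvLayer cs k
      (if PySem.Int.mod k 2 = 1 then List.range 26 else (List.range 26).reverse))

-- the keys of layer k, in sorted order (ascending i when k is odd, descending when even)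
def pvLayerKeys (cs : List Int) (k : Int) : List Int :=
  (if PySem.Int.mod k 2 = 1 then List.range 26 else (List.range 26).reverse).filterMap
    (fun i => if k ≤ cs.getD i 0 then some (pvEnc k (i : Int)) else none)

-- what sorting pvKeys must produce: all keys of layer 1, then layer 2, …
def pvTKeys (cs : List Int) : List Int :=
  (PySem.List.pyRange 1 (pvMax cs + 1) 1).flatMap (fun k => pvLayerKeys cs k)

lemma sum_set_int (cs : List Int) (j : Nat) (v : Int) (h : j < cs.length) :
    (cs.set j v).sum = cs.sum - cs[j] + v := by
  induction cs generalizing j with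
  | nil => simp at h
  | cons x t ih =>
    cases j with
    | zero =>
      simp only [List.set_cons_zero, List.sum_cons, List.getElem_cons_zero]
      ring
    | succ j =>
      have hj : j < t.length := by simpa using h
      simp only [List.set_cons_succ, List.sum_cons, List.getElem_cons_succ, ih j hj]
      ring

lemma all_zero_of_sum_zero (cs : List Int) (h0 : ∀ x ∈ cs, 0 ≤ x) (hs : cs.sum ≤ 0) :
    ∀ x ∈ cs, x = 0 := by
  induction cs with
  | nil => simp
  | cons x t ih =>
    have hx := h0 x (by simp)
    have ht : 0 ≤ t.sum := List.sum_nonneg (fun y hy => h0 y (by simp [hy]))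
    simp only [List.sum_cons] at hs
    intro y hy
    rcases List.mem_cons.1 hy with rfl | hy
    · omega
    · exact ih (fun z hz => h0 z (by simp [hz])) (by omega) y hy

lemma pvFor_spec (is : List Nat) (cs : List Int) (r : List Char) (cnt : Int)
    (hlt : ∀ i ∈ is, i < cs.length) (hnd : is.Nodup)
    (hnn : ∀ x ∈ cs, 0 ≤ x) (hcnt : cnt = cs.sum) :
    pvFor is cs r cnt = (pvDecOn is cs, r ++ pvLayer cs 1 is, (pvDecOn is cs).sum) := by
  induction is generalizing cs r cnt with
  | nil =>
    have hid : pvDecOn [] cs = cs := by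
      apply List.ext_getElem (by simp [pvDecOn])
      intro j h1 h2
      simp [pvDecOn, List.getElem_mapIdx]
    simp [pvFor, pvLayer, hid, hcnt]
  | cons i rest ih =>
    have hi : i < cs.length := hlt i (by simp)
    have hrest_lt : ∀ i' ∈ rest, i' < cs.length := fun i' h => hlt i' (by simp [h])
    have hnr : i ∉ rest := (List.nodup_cons.1 hnd).1
    have hndr : rest.Nodup := (List.nodup_cons.1 hnd).2
    have hgd : cs.getD i 0 = cs[i] := List.getD_eq_getElem cs 0 hi
    by_cases hpos : 0 < cs.getD i 0
    · have hposE : 0 < cs[i] := by rwa [hgd] at hpos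
      have hc' : cs.set i (cs.getD i 0 - 1) = cs.set i (cs[i] - 1) := by rw [hgd]
      have hc'get : ∀ (j : Nat) (hj : j < cs.length),
          (cs.set i (cs[i] - 1))[j]'(by simpa) = if j = i then cs[i] - 1 else cs[j] := by
        intro j hj
        rw [List.getElem_set]
        rcases eq_or_ne j i with h | h
        · simp [h]
        · simp [h, Ne.symm h]
      have hc'nn : ∀ x ∈ cs.set i (cs[i] - 1), 0 ≤ x := by
        intro x hx
        rcases List.mem_or_eq_of_mem_set hx with h | rfl
        · exact hnn x h
        · omega
      have hc'sum : (cs.set i (cs[i] - 1)).sum = cs.sum - 1 := by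
        rw [sum_set_int cs i _ hi]; ring
      have hlayer : pvLayer cs 1 (i :: rest) = pvChr i :: pvLayer cs 1 rest := by
        simp only [pvLayer, List.filterMap_cons, hgd,
          if_pos (show (1:Int) ≤ cs[i] by omega)]
      have hlayer_rest_eq : pvLayer (cs.set i (cs[i] - 1)) 1 rest = pvLayer cs 1 rest := by
        apply List.filterMap_congr
        intro i' hi'
        have hi'lt : i' < cs.length := hrest_lt i' hi'
        have hne : i' ≠ i := fun h => hnr (h ▸ hi')
        have hgg : (cs.set i (cs[i] - 1)).getD i' 0 = cs.getD i' 0 := by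
          rw [List.getD_eq_getElem _ 0 (by simpa), List.getD_eq_getElem cs 0 hi'lt,
            hc'get i' hi'lt]
          simp [hne]
        rw [hgg]
      have hdecon : pvDecOn rest (cs.set i (cs[i] - 1)) = pvDecOn (i :: rest) cs := by
        apply List.ext_getElem (by simp [pvDecOn])
        intro j h1 h2
        have hjc : j < cs.length := by simpa [pvDecOn] using h1
        simp only [pvDecOn, List.getElem_mapIdx]
        rw [hc'get j hjc]
        by_cases hj : j = i
        · subst hj
          simp [hnr, hposE]
        · simp [hj, List.mem_cons]
      by_cases hz : cnt - 1 = 0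
      · -- the break: everything that remains is zero
        have hall0 : ∀ x ∈ cs.set i (cs[i] - 1), x = 0 :=
          all_zero_of_sum_zero _ hc'nn (by omega)
        have hlr : pvLayer cs 1 rest = [] := by
          rw [pvLayer, List.filterMap_eq_nil_iff]
          intro i' hi'
          have hi'lt : i' < cs.length := hrest_lt i' hi'
          have hne : i' ≠ i := fun h => hnr (h ▸ hi')
          have h0' := hall0 ((cs.set i (cs[i] - 1))[i']'(by simpa)) (List.getElem_mem _)
          rw [hc'get i' hi'lt] at h0'
          rw [List.getD_eq_getElem cs 0 hi'lt]
          simp [hne] at h0'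
          simp [h0']
        have hdr : pvDecOn rest (cs.set i (cs[i] - 1)) = cs.set i (cs[i] - 1) := by
          apply List.ext_getElem (by simp [pvDecOn])
          intro j h1 h2
          simp only [pvDecOn, List.getElem_mapIdx]
          rw [hall0 _ (List.getElem_mem _)]
          simp
        rw [pvFor]
        simp only [if_pos hpos, if_pos hz]
        rw [hc', ← hdecon, hdr, hlayer, hlr]
        simp only [Prod.mk.injEq]
        refine ⟨by simp, by simp, by omega⟩
      · rw [pvFor]
        simp only [if_pos hpos, if_neg hz]
        rw [hc']
        rw [ih (cs.set i (cs[i] - 1)) (r ++ [pvChr i]) (cnt - 1)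
          (fun i' h => by rw [List.length_set]; exact hrest_lt i' h) hndr hc'nn (by omega)]
        rw [hdecon, hlayer_rest_eq, hlayer]
        simp
    · have hposE : ¬ 0 < cs[i] := by rwa [hgd] at hpos
      have hci : cs[i] = 0 := by have := hnn _ (List.getElem_mem hi); omega
      have hlayer : pvLayer cs 1 (i :: rest) = pvLayer cs 1 rest := by
        simp only [pvLayer, List.filterMap_cons, hgd, hci,
          if_neg (show ¬ (1:Int) ≤ 0 by norm_num)]
      have hdecon : pvDecOn rest cs = pvDecOn (i :: rest) cs := by
        apply List.ext_getElem (by simp [pvDecOn])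
        intro j h1 h2
        simp only [pvDecOn, List.getElem_mapIdx]
        by_cases hj : j = i
        · subst hj
          simp [hci]
        · simp [hj, List.mem_cons]
      rw [pvFor]
      simp only [if_neg hpos]
      rw [ih cs r cnt hrest_lt hndr hnn hcnt, hdecon, hlayer]

lemma pvDecOn_range (cs : List Int) (h : cs.length = 26) :
    pvDecOn (List.range 26) cs = pvDec cs := by
  apply List.ext_getElem (by simp [pvDecOn, pvDec])
  intro j h1 h2
  have hj : j < 26 := by simpa [pvDecOn, h] using h1
  simp [pvDecOn, pvDec, List.getElem_mapIdx, List.mem_range, hj]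

lemma pvDecOn_range_rev (cs : List Int) (h : cs.length = 26) :
    pvDecOn (List.range 26).reverse cs = pvDec cs := by
  apply List.ext_getElem (by simp [pvDecOn, pvDec])
  intro j h1 h2
  have hj : j < 26 := by simpa [pvDecOn, h] using h1
  simp [pvDecOn, pvDec, List.getElem_mapIdx, List.mem_range, hj]

lemma pvDec_length (cs : List Int) : (pvDec cs).length = cs.length := by
  simp [pvDec]

lemma pvDec_nonneg (cs : List Int) (h : ∀ x ∈ cs, 0 ≤ x) : ∀ x ∈ pvDec cs, 0 ≤ x := by
  intro x hx
  simp only [pvDec, List.mem_map] at hx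
  obtain ⟨y, hy, rfl⟩ := hx
  have := h y hy
  split <;> omega

lemma sum_dec_le (cs : List Int) : (pvDec cs).sum ≤ cs.sum := by
  induction cs with
  | nil => simp [pvDec]
  | cons x t ih =>
    simp only [pvDec, List.map_cons, List.sum_cons] at *
    have : (if 0 < x then x - 1 else x) ≤ x := by split <;> omega
    omega

lemma sum_dec_lt (cs : List Int) (h0 : ∀ x ∈ cs, 0 ≤ x) (hs : 0 < cs.sum) :
    (pvDec cs).sum < cs.sum := by
  induction cs with
  | nil => simp at hs
  | cons x t ih =>
    simp only [pvDec, List.map_cons, List.sum_cons] at *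
    by_cases hx : 0 < x
    · have := sum_dec_le t
      simp only [pvDec] at this
      split <;> omega
    · have hx0 : x = 0 := by have := h0 x (by simp); omega
      have ht : 0 < t.sum := by omega
      have := ih (fun z hz => h0 z (by simp [hz])) ht
      split <;> omega

-- max over the count list
lemma pvMax_mem (cs : List Int) (hne : cs ≠ []) : pvMax cs ∈ cs := by
  unfold pvMax
  cases hm : PySem.List.max? cs (fun x => x) with
  | none => exact absurd ((PySem.List.max?_eq_none_iff cs _).1 hm) hne
  | some v => exact PySem.List.max?_mem hm

lemma pvMax_isMax (cs : List Int) (hne : cs ≠ []) : ∀ y ∈ cs, y ≤ pvMax cs := by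
  unfold pvMax
  cases hm : PySem.List.max? cs (fun x => x) with
  | none => exact absurd ((PySem.List.max?_eq_none_iff cs _).1 hm) hne
  | some v => exact PySem.List.max?_isMax hm

lemma pvMax_nonneg (cs : List Int) (hne : cs ≠ []) (h0 : ∀ x ∈ cs, 0 ≤ x) : 0 ≤ pvMax cs := by
  exact h0 _ (pvMax_mem cs hne)

lemma pvMax_eq_of (cs : List Int) (hne : cs ≠ []) (m : Int) (hm : m ∈ cs)
    (hmax : ∀ y ∈ cs, y ≤ m) : pvMax cs = m := by
  exact le_antisymm (hmax _ (pvMax_mem cs hne)) (pvMax_isMax cs hne m hm)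

lemma pvMax_dec (cs : List Int) (hne : cs ≠ []) (_h0 : ∀ x ∈ cs, 0 ≤ x) :
    pvMax (pvDec cs) = if 0 < pvMax cs then pvMax cs - 1 else pvMax cs := by
  have hne' : pvDec cs ≠ [] := by simpa [pvDec, List.map_eq_nil_iff] using hne
  apply pvMax_eq_of _ hne'
  · exact List.mem_map_of_mem (pvMax_mem cs hne)
  · intro y hy
    simp only [pvDec, List.mem_map] at hy
    obtain ⟨x, hx, rfl⟩ := hy
    have hle := pvMax_isMax cs hne x hx
    by_cases h1 : 0 < x <;> by_cases h2 : 0 < pvMax cs <;> simp [h1, h2] <;> omega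

lemma pos_sum_iff_pos_max (cs : List Int) (hne : cs ≠ []) (h0 : ∀ x ∈ cs, 0 ≤ x) :
    0 < cs.sum ↔ 0 < pvMax cs := by
  constructor
  · intro hs
    by_contra hm
    have hz : ∀ x ∈ cs, x = 0 := by
      intro x hx
      have := pvMax_isMax cs hne x hx
      have := h0 x hx
      omega
    rw [List.sum_eq_zero hz] at hs
    omega
  · intro hm
    have hmem := pvMax_mem cs hne
    have : ∀ (l : List Int), (∀ x ∈ l, 0 ≤ x) → ∀ x ∈ l, x ≤ l.sum := by
      intro l hl
      induction l with
      | nil => simp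
      | cons a t ih =>
        intro x hx
        have hts : 0 ≤ t.sum := List.sum_nonneg (fun y hy => hl y (by simp [hy]))
        have ha : 0 ≤ a := hl a (by simp)
        rcases List.mem_cons.1 hx with rfl | hx
        · simp; omega
        · have := ih (fun y hy => hl y (by simp [hy])) x hx
          simp; omega
    have := this cs h0 _ hmem
    omega

-- threshold shift: a layer at level k+1 of cs is the layer at level k of the decremented counts
lemma pvLayer_dec (cs : List Int) (k : Int) (hk : 1 ≤ k) (is : List Nat)
    (hlt : ∀ i ∈ is, i < cs.length) (h0 : ∀ x ∈ cs, 0 ≤ x) :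
    pvLayer (pvDec cs) k is = pvLayer cs (k + 1) is := by
  apply List.filterMap_congr
  intro i hi
  have hilt : i < cs.length := hlt i hi
  have hd : (pvDec cs).getD i 0 =
      (if 0 < cs[i] then cs[i] - 1 else cs[i]) := by
    rw [List.getD_eq_getElem _ 0 (by simp [pvDec]; omega)]
    simp [pvDec]
  have hc : cs.getD i 0 = cs[i] := List.getD_eq_getElem cs 0 hilt
  have h0i := h0 _ (List.getElem_mem hilt)
  rw [hd, hc]
  have : (k ≤ if 0 < cs[i] then cs[i] - 1 else cs[i]) ↔ (k + 1 ≤ cs[i]) := by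
    split <;> omega
  simp [this]

lemma pvLayer_zero (cs : List Int) (k : Int) (hk : 1 ≤ k) (is : List Nat)
    (hlt : ∀ i ∈ is, i < cs.length) (hz : ∀ x ∈ cs, x = 0) :
    pvLayer cs k is = [] := by
  rw [pvLayer, List.filterMap_eq_nil_iff]
  intro i hi
  have hilt : i < cs.length := hlt i hi
  rw [List.getD_eq_getElem cs 0 hilt, hz _ (List.getElem_mem hilt)]
  simp
  omega

lemma pvB_zero (cs : List Int) (hne : cs ≠ []) (h0 : ∀ x ∈ cs, 0 ≤ x) (hs : cs.sum ≤ 0) :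
    pvB cs = [] := by
  have hm : pvMax cs = 0 := by
    have h1 := pvMax_nonneg cs hne h0
    have h2 := all_zero_of_sum_zero cs h0 hs _ (pvMax_mem cs hne)
    omega
  rw [pvB, hm]
  rw [PySem.List.pyRange_one_eq_nil (by norm_num)]
  simp

lemma pvB_step (cs : List Int) (h26 : cs.length = 26) (h0 : ∀ x ∈ cs, 0 ≤ x) (hs : 0 < cs.sum) :
    pvB cs = pvLayer cs 1 (List.range 26) ++ pvLayer (pvDec cs) 1 (List.range 26).reverse
      ++ pvB (pvDec (pvDec cs)) := by
  have hne : cs ≠ [] := by intro h; rw [h] at h26; simp at h26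
  have hne1 : pvDec cs ≠ [] := by simp [pvDec, List.map_eq_nil_iff, hne]
  have hne2 : pvDec (pvDec cs) ≠ [] := by simp [pvDec, List.map_eq_nil_iff, hne]
  have h01 : ∀ x ∈ pvDec cs, 0 ≤ x := pvDec_nonneg cs h0
  have h02 : ∀ x ∈ pvDec (pvDec cs), 0 ≤ x := pvDec_nonneg _ h01
  have hlt1 : ∀ i ∈ List.range 26, i < cs.length := by
    intro i hi; rw [h26]; exact List.mem_range.1 hi
  have hlt1r : ∀ i ∈ (List.range 26).reverse, i < cs.length := by
    intro i hi; exact hlt1 i (List.mem_reverse.1 hi)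
  have hltd : ∀ i ∈ (List.range 26).reverse, i < (pvDec cs).length := by
    intro i hi; rw [pvDec_length, h26]; exact List.mem_range.1 (List.mem_reverse.1 hi)
  have hm1 : 0 < pvMax cs := (pos_sum_iff_pos_max cs hne h0).1 hs
  have hmd1 : pvMax (pvDec cs) = pvMax cs - 1 := by
    rw [pvMax_dec cs hne h0, if_pos hm1]
  have hmd2 : pvMax (pvDec (pvDec cs)) =
      if 0 < pvMax cs - 1 then pvMax cs - 2 else pvMax cs - 1 := by
    rw [pvMax_dec _ hne1 h01, hmd1]
    split <;> ring
  rcases eq_or_lt_of_le (by omega : (1:Int) ≤ pvMax cs) with h1 | h2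
  · -- maxcount = 1: only one ascending layer remains
    have hz1 : ∀ x ∈ pvDec cs, x = 0 := by
      intro x hx
      simp only [pvDec, List.mem_map] at hx
      obtain ⟨y, hy, rfl⟩ := hx
      have := pvMax_isMax cs hne y hy
      have := h0 y hy
      split <;> omega
    have hz2 : ∀ x ∈ pvDec (pvDec cs), x = 0 := by
      intro x hx
      rw [pvDec, List.mem_map] at hx
      obtain ⟨y, hy, rfl⟩ := hx
      rw [hz1 y (by rw [pvDec]; exact hy)]
      simp
    rw [pvB, ← h1]
    rw [show PySem.List.pyRange 1 (1 + 1) 1 = [1] from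
      PySem.List.pyRange_one_singleton 1]
    rw [pvLayer_zero (pvDec cs) 1 le_rfl _ hltd hz1]
    rw [pvB_zero _ hne2 h02 (by rw [List.sum_eq_zero hz2])]
    simp
  · -- maxcount ≥ 2: peel the first two layers
    have hr : PySem.List.pyRange 1 (pvMax cs + 1) 1 =
        1 :: 2 :: PySem.List.pyRange 3 (pvMax cs + 1) 1 := by
      rw [PySem.List.pyRange_one_cons (by omega), PySem.List.pyRange_one_cons (by omega)]
      norm_num
    rw [pvB, hr]
    simp only [List.flatMap_cons]
    rw [show PySem.Int.mod 1 2 = 1 from by decide]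
    rw [if_pos rfl]
    rw [if_neg (show ¬ PySem.Int.mod 2 2 = 1 from by decide)]
    have hL2 : pvLayer cs 2 (List.range 26).reverse
        = pvLayer (pvDec cs) 1 (List.range 26).reverse := by
      rw [pvLayer_dec cs 1 le_rfl _ hlt1r h0]
      norm_num
    have htail : (PySem.List.pyRange 3 (pvMax cs + 1) 1).flatMap
        (fun k => pvLayer cs k
          (if PySem.Int.mod k 2 = 1 then List.range 26 else (List.range 26).reverse))
        = pvB (pvDec (pvDec cs)) := by
      rw [pvB, hmd2, if_pos (by omega)]
      rw [PySem.List.pyRange_one 3 (pvMax cs + 1), PySem.List.pyRange_one 1 (pvMax cs - 2 + 1)]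
      have hn : (pvMax cs + 1 - 3).toNat = (pvMax cs - 2 + 1 - 1).toNat := by omega
      rw [hn]
      rw [List.flatMap_map, List.flatMap_map]
      rw [List.flatMap_def, List.flatMap_def]
      congr 1
      apply List.map_congr_left
      intro k hk
      have hmod : PySem.Int.mod (3 + (k:Int)) 2 = PySem.Int.mod (1 + (k:Int)) 2 := by
        rw [PySem.Int.mod_eq_emod_of_pos (by norm_num),
          PySem.Int.mod_eq_emod_of_pos (by norm_num)]
        omega
      rw [hmod]
      have hlay : ∀ is : List Nat, (∀ i ∈ is, i < cs.length) →
          pvLayer cs (3 + (k:Int)) is = pvLayer (pvDec (pvDec cs)) (1 + (k:Int)) is := by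
        intro is hlt
        have hltD : ∀ i ∈ is, i < (pvDec cs).length := by
          intro i hi; rw [pvDec_length]; exact hlt i hi
        rw [pvLayer_dec (pvDec cs) (1 + (k:Int)) (by omega) is hltD h01]
        rw [pvLayer_dec cs (1 + (k:Int) + 1) (by omega) is hlt h0]
        congr 1
        omega
      exact hlay _ (by split_ifs <;> [exact hlt1; exact hlt1r])
    rw [hL2, htail]
    simp [List.append_assoc]

lemma pvWhile_eq (fuel : Nat) (cs : List Int) (r : List Char) (cnt : Int)
    (h26 : cs.length = 26) (h0 : ∀ x ∈ cs, 0 ≤ x) (hcnt : cnt = cs.sum)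
    (hfuel : cs.sum ≤ (fuel : Int)) :
    pvWhile fuel cs r cnt = r ++ pvB cs := by
  induction fuel generalizing cs r cnt with
  | zero =>
    have hs0 : cs.sum = 0 := by
      have := List.sum_nonneg h0
      omega
    have hne : cs ≠ [] := by intro h; rw [h] at h26; simp at h26
    rw [pvWhile, pvB_zero cs hne h0 (by omega)]
    simp
  | succ fuel ih =>
    have hne : cs ≠ [] := by intro h; rw [h] at h26; simp at h26
    by_cases hpos : 0 < cnt
    · rw [pvWhile]
      rw [if_pos hpos]
      have hlt1 : ∀ i ∈ List.range 26, i < cs.length := by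
        intro i hi; rw [h26]; exact List.mem_range.1 hi
      have h1 := pvFor_spec (List.range 26) cs r cnt hlt1 List.nodup_range h0 hcnt
      rw [pvDecOn_range cs h26] at h1
      have hd26 : (pvDec cs).length = 26 := by rw [pvDec_length, h26]
      have h01 : ∀ x ∈ pvDec cs, 0 ≤ x := pvDec_nonneg cs h0
      have hlt2 : ∀ i ∈ (List.range 26).reverse, i < (pvDec cs).length := by
        intro i hi; rw [hd26]; exact List.mem_range.1 (List.mem_reverse.1 hi)
      have h2 := pvFor_spec (List.range 26).reverse (pvDec cs) (r ++ pvLayer cs 1 (List.range 26))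
        (pvDec cs).sum hlt2 (List.nodup_reverse.2 List.nodup_range) h01 rfl
      rw [pvDecOn_range_rev (pvDec cs) hd26] at h2
      rw [h1]
      simp only []
      rw [h2]
      simp only []
      have hdd26 : (pvDec (pvDec cs)).length = 26 := by rw [pvDec_length, hd26]
      have h02 : ∀ x ∈ pvDec (pvDec cs), 0 ≤ x := pvDec_nonneg _ h01
      have hssum : 0 < cs.sum := by omega
      have hdec1 : (pvDec cs).sum < cs.sum := sum_dec_lt cs h0 hssum
      have hdec2 : (pvDec (pvDec cs)).sum ≤ (pvDec cs).sum := sum_dec_le (pvDec cs)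
      rw [ih (pvDec (pvDec cs)) _ _ hdd26 h02 rfl (by push_cast; omega)]
      rw [pvB_step cs h26 h0 hssum]
      simp [List.append_assoc]
    · have hs0 : cs.sum = 0 := by
        have := List.sum_nonneg h0
        omega
      rw [pvWhile, if_neg hpos, pvB_zero cs hne h0 (by omega)]
      simp

lemma pvCount_spec (l : List Char)
    (hpre : ∀ ch ∈ l, 71 ≤ ch.toNat ∧ ch.toNat ≤ 122) :
    (pvCount l).length = 26 ∧ (∀ x ∈ pvCount l, 0 ≤ x) ∧
      (pvCount l).sum = (l.length : Int) := by
  have step : ∀ (cs : List Int) (ch : Char), cs.length = 26 →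
      71 ≤ ch.toNat → ch.toNat ≤ 122 →
      ∃ j : Nat, j < 26 ∧
        PySem.List.pySetD cs ((ch.toNat : Int) - 97)
          (PySem.List.pyGetD cs ((ch.toNat : Int) - 97) 0 + 1) = cs.set j (cs.getD j 0 + 1) := by
    intro cs ch hlen h1 h2
    by_cases hnn : 0 ≤ (ch.toNat : Int) - 97
    · refine ⟨((ch.toNat : Int) - 97).toNat, by omega, ?_⟩
      have hidx : PySem.List.pyIdx? cs.length ((ch.toNat : Int) - 97)
          = some ((ch.toNat : Int) - 97).toNat := by
        simp only [PySem.List.pyIdx?, if_pos hnn]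
        rw [if_pos (by omega)]
      simp only [PySem.List.pySetD, PySem.List.pySet?, PySem.List.pyGetD, PySem.List.pyGet?, hidx]
      simp [List.getD_eq_getElem?_getD]
    · refine ⟨cs.length - (-((ch.toNat : Int) - 97)).toNat, by omega, ?_⟩
      have hidx : PySem.List.pyIdx? cs.length ((ch.toNat : Int) - 97)
          = some (cs.length - (-((ch.toNat : Int) - 97)).toNat) := by
        simp only [PySem.List.pyIdx?, if_neg hnn]
        rw [if_pos (by omega)]
      simp only [PySem.List.pySetD, PySem.List.pySet?, PySem.List.pyGetD, PySem.List.pyGet?, hidx]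
      simp [List.getD_eq_getElem?_getD]
  suffices h : ∀ (l : List Char) (cs : List Int), cs.length = 26 → (∀ x ∈ cs, 0 ≤ x) →
      (∀ ch ∈ l, 71 ≤ ch.toNat ∧ ch.toNat ≤ 122) →
      (l.foldl (fun c ch =>
        PySem.List.pySetD c ((ch.toNat : Int) - 97)
          (PySem.List.pyGetD c ((ch.toNat : Int) - 97) 0 + 1)) cs).length = 26 ∧
      (∀ x ∈ (l.foldl (fun c ch =>
        PySem.List.pySetD c ((ch.toNat : Int) - 97)
          (PySem.List.pyGetD c ((ch.toNat : Int) - 97) 0 + 1)) cs), 0 ≤ x) ∧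
      (l.foldl (fun c ch =>
        PySem.List.pySetD c ((ch.toNat : Int) - 97)
          (PySem.List.pyGetD c ((ch.toNat : Int) - 97) 0 + 1)) cs).sum = cs.sum + (l.length : Int) by
    have := h l (List.replicate 26 0) (by simp) (by simp) hpre
    simpa [pvCount] using this
  intro l
  induction l with
  | nil => intro cs h26 h0 _; simpa using ⟨h26, h0⟩
  | cons ch t ih =>
    intro cs h26 h0 hpre'
    obtain ⟨j, hj, hstep⟩ := step cs ch h26 (hpre' ch (by simp)).1 (hpre' ch (by simp)).2
    simp only [List.foldl_cons, hstep]
    have hjlen : j < cs.length := by omega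
    have hgd : cs.getD j 0 = cs[j]'hjlen := List.getD_eq_getElem cs 0 hjlen
    have h26' : (cs.set j (cs.getD j 0 + 1)).length = 26 := by simpa using h26
    have h0' : ∀ x ∈ cs.set j (cs.getD j 0 + 1), 0 ≤ x := by
      intro x hx
      rcases List.mem_or_eq_of_mem_set hx with h | rfl
      · exact h0 x h
      · have := h0 _ (List.getElem_mem hjlen)
        rw [hgd]
        omega
    have hsum' : (cs.set j (cs.getD j 0 + 1)).sum = cs.sum + 1 := by
      rw [hgd, sum_set_int cs j _ hjlen]; ring
    obtain ⟨a, b, c⟩ := ih (cs.set j (cs.getD j 0 + 1)) h26' h0'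
      (fun ch' h => hpre' ch' (by simp [h]))
    refine ⟨a, b, ?_⟩
    rw [c, hsum']
    simp only [List.length_cons]
    push_cast [List.length_cons]
    ring

-- ===== B-side lemmas: sorting the keys produces the layer sequence =====

-- arithmetic of the key encoding
lemma pvEnc_bounds (k i : Int) (hi0 : 0 ≤ i) (hi : i ≤ 25) :
    k * 26 ≤ pvEnc k i ∧ pvEnc k i ≤ k * 26 + 25 := by
  unfold pvEnc
  split <;> omega

lemma pvEnc_floordiv (k i : Int) (hi0 : 0 ≤ i) (hi : i ≤ 25) :
    PySem.Int.floordiv (pvEnc k i) 26 = k := by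
  have hb := pvEnc_bounds k i hi0 hi
  rw [PySem.Int.floordiv_eq_iff_of_pos (by norm_num)]
  omega

lemma pvEnc_mod (k i : Int) (hi0 : 0 ≤ i) (hi : i ≤ 25) :
    PySem.Int.mod (pvEnc k i) 26 = (if PySem.Int.mod k 2 = 1 then i else 25 - i) := by
  have hd := PySem.Int.floordiv_mul_add_mod (pvEnc k i) 26
  rw [pvEnc_floordiv k i hi0 hi] at hd
  unfold pvEnc at hd ⊢
  split_ifs at hd ⊢ <;> omega

lemma pvEnc_inj (k1 i1 k2 i2 : Int) (h1 : 0 ≤ i1) (h1' : i1 ≤ 25)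
    (h2 : 0 ≤ i2) (h2' : i2 ≤ 25) (heq : pvEnc k1 i1 = pvEnc k2 i2) :
    k1 = k2 ∧ i1 = i2 := by
  unfold pvEnc at heq
  have hk : k1 = k2 := by split_ifs at heq <;> omega
  subst hk
  split_ifs at heq <;> omega

lemma pvDecode_enc (k : Int) (i : Nat) (hi : i ≤ 25) :
    pvDecode (pvEnc k (i : Int)) = pvChr i := by
  unfold pvDecode
  rw [pvEnc_floordiv k i (by omega) (by exact_mod_cast hi),
    pvEnc_mod k i (by omega) (by exact_mod_cast hi)]
  unfold pvChr
  split <;> congr 1 <;> omega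

-- pvKeys as a flatMap (unwinding the two append-folds)
lemma pvKeys_eq_flatMap (c : List Int) :
    pvKeys c = (PySem.List.pyRange 0 26 1).flatMap
      (fun i => (PySem.List.pyRange 1 (PySem.List.pyGetD c i 0 + 1) 1).map
        (fun k => pvEnc k i)) := by
  unfold pvKeys
  have hfun : (fun (acc : List Int) (i : Int) =>
      (PySem.List.pyRange 1 (PySem.List.pyGetD c i 0 + 1) 1).foldl
        (fun acc2 k => acc2 ++ [pvEnc k i]) acc)
      = (fun acc i => acc ++ (PySem.List.pyRange 1 (PySem.List.pyGetD c i 0 + 1) 1).map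
        (fun k => pvEnc k i)) := by
    funext acc i
    exact PySem.List.foldl_append_singleton_eq_map _ _ _
  rw [hfun, PySem.List.foldl_append_eq_flatMap]
  simp

-- members of a layer's key list are the in-range encodings
lemma mem_pvLayerKeys (cs : List Int) (k m : Int) :
    m ∈ pvLayerKeys cs k ↔
      ∃ i : Nat, i < 26 ∧ k ≤ cs.getD i 0 ∧ m = pvEnc k (i : Int) := by
  unfold pvLayerKeys
  constructor
  · intro hm
    obtain ⟨i, hi, hsome⟩ := List.mem_filterMap.1 hm
    rw [Option.ite_none_right_eq_some, Option.some.injEq] at hsome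
    have hi26 : i < 26 := by
      split_ifs at hi with hpar
      · exact List.mem_range.1 hi
      · exact List.mem_range.1 (List.mem_reverse.1 hi)
    exact ⟨i, hi26, hsome.1, hsome.2.symm⟩
  · rintro ⟨i, hi26, hc, rfl⟩
    apply List.mem_filterMap.2
    refine ⟨i, ?_, by rw [if_pos hc]⟩
    split_ifs
    · exact List.mem_range.2 hi26
    · exact List.mem_reverse.2 (List.mem_range.2 hi26)

-- keys of layer k lie in [k*26, k*26+25]
lemma pvLayerKeys_bounds (cs : List Int) (k m : Int) (hm : m ∈ pvLayerKeys cs k) :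
    k * 26 ≤ m ∧ m ≤ k * 26 + 25 := by
  obtain ⟨i, hi26, _, rfl⟩ := (mem_pvLayerKeys cs k m).1 hm
  exact pvEnc_bounds k (i : Int) (by positivity)
    (by exact_mod_cast Nat.le_of_lt_succ hi26)

-- each layer's key list is strictly increasing
lemma pvLayerKeys_pairwise (cs : List Int) (k : Int) :
    (pvLayerKeys cs k).Pairwise (· < ·) := by
  unfold pvLayerKeys
  rw [List.pairwise_filterMap]
  split_ifs with hpar
  · refine List.Pairwise.imp ?_ (List.pairwise_lt_range (n := 26))
    intro a b hab x hx y hy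
    rw [Option.ite_none_right_eq_some, Option.some.injEq] at hx hy
    rw [← hx.2, ← hy.2]
    unfold pvEnc
    rw [if_pos hpar]
    omega
  · rw [List.pairwise_reverse]
    refine List.Pairwise.imp ?_ (List.pairwise_lt_range (n := 26))
    intro a b hab x hx y hy
    rw [Option.ite_none_right_eq_some, Option.some.injEq] at hx hy
    rw [← hx.2, ← hy.2]
    unfold pvEnc
    rw [if_neg hpar]
    omega

-- the target key list is strictly increasing
lemma pvTKeys_pairwise (cs : List Int) : (pvTKeys cs).Pairwise (· < ·) := by
  unfold pvTKeys
  rw [List.pairwise_flatMap]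
  constructor
  · intro k _
    exact pvLayerKeys_pairwise cs k
  · refine List.Pairwise.imp ?_ (PySem.List.pairwise_lt_pyRange_one 1 (pvMax cs + 1))
    intro k1 k2 h12 x hx y hy
    have hb1 := pvLayerKeys_bounds cs k1 x hx
    have hb2 := pvLayerKeys_bounds cs k2 y hy
    nlinarith

-- the built key list has no duplicates
lemma pvKeys_nodup (c : List Int) : (pvKeys c).Nodup := by
  rw [pvKeys_eq_flatMap, List.nodup_flatMap]
  constructor
  · intro i hi
    have hi' : 0 ≤ i ∧ i < 26 := PySem.List.mem_pyRange_one.1 hi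
    refine List.Nodup.map ?_ (PySem.List.nodup_pyRange_one _ _)
    intro k1 k2 heq
    exact (pvEnc_inj k1 i k2 i hi'.1 (by omega) hi'.1 (by omega) heq).1
  · refine List.Pairwise.imp_of_mem ?_ (PySem.List.pairwise_lt_pyRange_one 0 26)
    intro i1 i2 hm1 hm2 h12 m hx1 hx2
    have hb1 : 0 ≤ i1 ∧ i1 < 26 := PySem.List.mem_pyRange_one.1 hm1
    have hb2 : 0 ≤ i2 ∧ i2 < 26 := PySem.List.mem_pyRange_one.1 hm2
    obtain ⟨k1, hk1, rfl⟩ := List.mem_map.1 hx1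
    obtain ⟨k2, hk2, heq⟩ := List.mem_map.1 hx2
    have := pvEnc_inj k2 i2 k1 i1 hb2.1 (by omega) hb1.1 (by omega) heq
    omega

-- membership in pvKeys
lemma mem_pvKeys (c : List Int) (h26 : c.length = 26) (m : Int) :
    m ∈ pvKeys c ↔ ∃ i : Nat, i < 26 ∧ ∃ k : Int, 1 ≤ k ∧ k ≤ c.getD i 0 ∧
      m = pvEnc k (i : Int) := by
  rw [pvKeys_eq_flatMap]
  simp only [List.mem_flatMap, List.mem_map]
  constructor
  · rintro ⟨i, hi, k, hk, rfl⟩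
    have hi' : 0 ≤ i ∧ i < 26 := PySem.List.mem_pyRange_one.1 hi
    have hk' : 1 ≤ k ∧ k < PySem.List.pyGetD c i 0 + 1 := PySem.List.mem_pyRange_one.1 hk
    have hgd : PySem.List.pyGetD c i 0 = c.getD i.toNat 0 := by
      rw [PySem.List.pyGetD_eq_getElem c (i := i) 0 hi'.1 (by omega),
        List.getD_eq_getElem c 0 (by omega)]
    refine ⟨i.toNat, by omega, k, hk'.1, by rw [← hgd]; omega, ?_⟩
    congr 1
    omega
  · rintro ⟨i, hi26, k, hk1, hkc, rfl⟩
    refine ⟨(i : Int), PySem.List.mem_pyRange_one.2 ⟨by omega, by exact_mod_cast hi26⟩,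
      k, PySem.List.mem_pyRange_one.2 ⟨hk1, ?_⟩, rfl⟩
    rw [PySem.List.pyGetD_natCast]
    omega

-- membership in the target
lemma mem_pvTKeys (cs : List Int) (h26 : cs.length = 26) (m : Int) :
    m ∈ pvTKeys cs ↔ ∃ i : Nat, i < 26 ∧ ∃ k : Int, 1 ≤ k ∧ k ≤ cs.getD i 0 ∧
      m = pvEnc k (i : Int) := by
  have hne : cs ≠ [] := by intro h; rw [h] at h26; simp at h26
  unfold pvTKeys
  simp only [List.mem_flatMap]
  constructor
  · rintro ⟨k, hk, hm⟩
    have hk' : 1 ≤ k ∧ k < pvMax cs + 1 := PySem.List.mem_pyRange_one.1 hk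
    obtain ⟨i, hi26, hc, rfl⟩ := (mem_pvLayerKeys cs k m).1 hm
    exact ⟨i, hi26, k, hk'.1, hc, rfl⟩
  · rintro ⟨i, hi26, k, hk1, hkc, rfl⟩
    have hmem : cs.getD i 0 ∈ cs := by
      rw [List.getD_eq_getElem cs 0 (by omega)]
      exact List.getElem_mem _
    have hmax : cs.getD i 0 ≤ pvMax cs := pvMax_isMax cs hne _ hmem
    refine ⟨k, PySem.List.mem_pyRange_one.2 ⟨hk1, by omega⟩, ?_⟩
    exact (mem_pvLayerKeys cs k _).2 ⟨i, hi26, hkc, rfl⟩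

-- sorting the built keys gives exactly the target
lemma sorted_pvKeys (c : List Int) (h26 : c.length = 26) :
    PySem.List.sorted (pvKeys c) (fun x => x) false = pvTKeys c := by
  apply PySem.List.sorted_eq_of_perm_of_pairwise_lt
  · rw [List.perm_ext_iff_of_nodup
      ((pvTKeys_pairwise c).imp (fun h => ne_of_lt h)) (pvKeys_nodup c)]
    intro m
    rw [mem_pvTKeys c h26 m, mem_pvKeys c h26 m]
  · exact pvTKeys_pairwise c

-- decoding the target keys yields the layer sequence
lemma map_decode_pvTKeys (cs : List Int) :
    (pvTKeys cs).map pvDecode = pvB cs := by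
  unfold pvTKeys pvB
  rw [List.map_flatMap]
  congr 1
  funext k
  unfold pvLayerKeys pvLayer
  split_ifs with hpar <;>
  · rw [List.map_filterMap]
    apply List.filterMap_congr
    intro i hi
    have hi26 : i < 26 := by
      first
      | exact List.mem_range.1 hi
      | exact List.mem_range.1 (List.mem_reverse.1 hi)
    split_ifs with hc
    · rw [Option.map_some, pvDecode_enc k i (by omega)]
    · rfl

-- ===== VERDICT (by name: the statement is the Claim_ definition above) =====
theorem solution_spec : Claim_equal_solution := by
  intro s _ hpre
  have hpre' : ∀ ch ∈ s.toList, 71 ≤ ch.toNat ∧ ch.toNat ≤ 122 := by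
    unfold Pre_solution at hpre
    intro ch hch
    have h := List.all_eq_true.1 hpre ch hch
    simpa using h
  obtain ⟨h26, h0, hsum⟩ := pvCount_spec s.toList hpre'
  show String.mk (pvWhile s.toList.length (pvCount s.toList) [] (s.toList.length : Int)) =
    String.mk ((PySem.List.sorted (pvKeys (pvCount s.toList)) (fun x => x) false).map pvDecode)
  rw [sorted_pvKeys _ h26, map_decode_pvTKeys,
    pvWhile_eq s.toList.length (pvCount s.toList) [] _ h26 h0 hsum.symm (by rw [hsum])]
  rfl
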